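-- pv_equiv track=rewrite | github.com/simmol/aktis_tasks | mouse_vs_mouse.py | mouse_vs_mouse
-- ===== SOURCE A (Python) =====
-- class MouseType:
--     animal = 'animal'
--     computer_mouse = 'computer-mouse'
--
-- concrete_matches = {
--     MouseType.animal: ['rodent', 'tail', 'genome', 'species', 'breeding', 'ears', 'rat', 'sanitation', 'sleep',
--                        'evolution', 'house mouse', 'on mouse'],
--     MouseType.computer_mouse: ['device', 'USB', 'computer', 'object', 'keyboard']
-- }
--
-- def mouse_vs_mouse(sentence):
--     for word in concrete_matches[MouseType.animal]:
--         if word.lower() in sentence.lower():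
--             return MouseType.animal
--
--     for word in concrete_matches[MouseType.computer_mouse]:
--         if word.lower() in sentence.lower():
--             return MouseType.computer_mouse
--
--     # If not sure most likely will be animal
--     return MouseType.computer_mouse
-- ===== SOURCE B (Python) =====
-- class MouseType:
--     animal = 'animal'
--     computer_mouse = 'computer-mouse'
--
-- concrete_matches = {
--     MouseType.animal: ['rodent', 'tail', 'genome', 'species', 'breeding', 'ears', 'rat', 'sanitation', 'sleep',
--                        'evolution', 'house mouse', 'on mouse'],
--     MouseType.computer_mouse: ['device', 'USB', 'computer', 'object', 'keyboard']
-- }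
--
-- def mouse_vs_mouse(sentence):
--     # Text-driven scan: walk the lowered sentence position by position and test
--     # whether an animal keyword starts there; the computer-keyword scan is dead
--     # code (its result equals the default) and is dropped.
--     low = sentence.lower()
--     keys = [w.lower() for w in concrete_matches[MouseType.animal]]
--     for i in range(len(low) + 1):
--         if any(low.startswith(w, i) for w in keys):
--             return MouseType.animal
--     return MouseType.computer_mouse
-- ===== Notes on version B (the rewrite author's own statement) =====
-- stated objective: alternative
-- what changed: Inverts the traversal: instead of two keyword-driven loops each substring-searching the sentence, B lowers the sentence once and walks it position by position testing whether any animal keyword starts there, dropping the dead computer-keyword loop whose result equals the default.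
import Mathlib
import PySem

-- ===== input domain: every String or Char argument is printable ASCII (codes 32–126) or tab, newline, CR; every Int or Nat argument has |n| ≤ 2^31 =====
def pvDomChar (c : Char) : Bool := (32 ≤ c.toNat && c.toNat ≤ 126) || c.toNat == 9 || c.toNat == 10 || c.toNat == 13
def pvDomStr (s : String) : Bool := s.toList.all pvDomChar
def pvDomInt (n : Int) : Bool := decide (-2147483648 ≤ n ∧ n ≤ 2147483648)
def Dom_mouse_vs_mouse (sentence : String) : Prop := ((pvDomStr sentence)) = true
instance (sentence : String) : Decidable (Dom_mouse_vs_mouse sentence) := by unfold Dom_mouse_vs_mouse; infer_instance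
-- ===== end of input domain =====

-- B inverts the traversal: it walks the lowered sentence position by position, testing
-- whether an animal keyword starts there, and drops A's dead computer-keyword loop.

-- ===== PORT A =====
def pvAnimalWords : List String :=
  ["rodent", "tail", "genome", "species", "breeding", "ears", "rat", "sanitation", "sleep",
   "evolution", "house mouse", "on mouse"]

def pvComputerWords : List String := ["device", "USB", "computer", "object", "keyboard"]

-- the early-return for-loop: `some tag` at the first keyword whose lowercase is in sentence.lower()
def pvLoopA (words : List String) (tag : String) (sentence : String) : Option String :=
  match words with
  | [] => none
  | w :: ws =>
      if PySem.Str.isIn (PySem.Str.lower w) (PySem.Str.lower sentence) then some tag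
      else pvLoopA ws tag sentence

def mouse_vs_mouse (sentence : String) : String :=
  match pvLoopA pvAnimalWords "animal" sentence with
  | some r => r
  | none =>
      match pvLoopA pvComputerWords "computer-mouse" sentence with
      | some r => r
      | none => "computer-mouse"

-- ===== PORT B =====
-- position-by-position scan of the lowered text: does any key start at the current suffix?
def pvScanB (keys : List (List Char)) (cs : List Char) : Bool :=
  if keys.any (fun k => k.isPrefixOf cs) then true
  else
    match cs with
    | [] => false
    | _ :: rest => pvScanB keys rest

def mouse_vs_mouse_alt (sentence : String) : String :=
  let low := (PySem.Str.lower sentence).toList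
  let keys := pvAnimalWords.map (fun w => (PySem.Str.lower w).toList)
  if pvScanB keys low then "animal" else "computer-mouse"

-- ===== PRECONDITION & SPEC =====
def Spec_mouse_vs_mouse (sentence : String) (out : String) : Prop := out = mouse_vs_mouse_alt sentence
instance (sentence : String) (out : String) : Decidable (Spec_mouse_vs_mouse sentence out) := by unfold Spec_mouse_vs_mouse; infer_instance

-- ===== CLAIM (what is proved, stated in full; the proofs are below) =====
def Claim_equal_mouse_vs_mouse : Prop := ∀ (sentence : String), Dom_mouse_vs_mouse sentence → Spec_mouse_vs_mouse sentence (mouse_vs_mouse sentence)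

-- ===== LEMMAS AND PROOFS =====

-- A's early-return loop yields `some tag` exactly when some keyword matches
theorem pvLoopA_eq (words : List String) (tag sentence : String) :
    pvLoopA words tag sentence =
      (if words.any (fun w => PySem.Str.isIn (PySem.Str.lower w) (PySem.Str.lower sentence)) = true
       then some tag else none) := by
  induction words with
  | nil => rfl
  | cons w ws ih =>
      simp only [pvLoopA, List.any_cons, ih]
      by_cases h : PySem.Str.isIn (PySem.Str.lower w) (PySem.Str.lower sentence) = true
      · rw [if_pos h]; simp only [h, Bool.true_or, if_true]
      · have h' : PySem.Str.isIn (PySem.Str.lower w) (PySem.Str.lower sentence) = false :=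
          Bool.not_eq_true _ |>.mp h
        rw [if_neg h]; simp only [h', Bool.false_or]

-- B's text scan finds exactly the keys that occur as an infix (for nonempty keys)
theorem pvScanB_eq_any_infix (keys : List (List Char)) (cs : List Char)
    (hne : ∀ k ∈ keys, k ≠ []) :
    pvScanB keys cs = keys.any (fun k => decide (k <:+: cs)) := by
  induction cs with
  | nil =>
      simp only [pvScanB]
      have h1 : keys.any (fun k => k.isPrefixOf ([] : List Char)) = false := by
        simp only [List.any_eq_false]
        intro k hk
        cases k with
        | nil => exact absurd rfl (hne [] hk)
        | cons a l => simp [List.isPrefixOf]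
      have h2 : keys.any (fun k => decide (k <:+: ([] : List Char))) = false := by
        simp only [List.any_eq_false, List.infix_nil, decide_eq_true_eq]
        exact hne
      rw [h1, h2]; rfl
  | cons c rest ih =>
      simp only [pvScanB]
      by_cases h : keys.any (fun k => k.isPrefixOf (c :: rest)) = true
      · rw [if_pos h]
        symm
        simp only [List.any_eq_true] at h ⊢
        obtain ⟨k, hk, hp⟩ := h
        exact ⟨k, hk, by simpa using (List.isPrefixOf_iff_prefix.mp hp).isInfix⟩
      · rw [if_neg h, ih]
        rw [Bool.eq_iff_iff]
        simp only [List.any_eq_true, List.isPrefixOf_iff_prefix, decide_eq_true_eq] at h ⊢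
        constructor
        · rintro ⟨k, hk, hkp⟩
          exact ⟨k, hk, List.infix_cons hkp⟩
        · rintro ⟨k, hk, hkp⟩
          rcases List.infix_cons_iff.mp hkp with hpre | hinf
          · exact absurd ⟨k, hk, hpre⟩ h
          · exact ⟨k, hk, hinf⟩

-- ===== VERDICT (by name: the statement is the Claim_ definition above) =====
theorem mouse_vs_mouse_spec : Claim_equal_mouse_vs_mouse := by
  intro sentence _
  show mouse_vs_mouse sentence = mouse_vs_mouse_alt sentence
  simp only [mouse_vs_mouse, mouse_vs_mouse_alt]
  rw [pvLoopA_eq, pvLoopA_eq,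
      pvScanB_eq_any_infix _ _ (by decide), List.any_map]
  have hiff : ∀ w : String,
      PySem.Str.isIn (PySem.Str.lower w) (PySem.Str.lower sentence)
        = decide ((PySem.Str.lower w).toList <:+: (PySem.Str.lower sentence).toList) := by
    intro w
    by_cases h : (PySem.Str.lower w).toList <:+: (PySem.Str.lower sentence).toList
    · rw [(PySem.Str.isIn_iff_infix _ _).mpr h, decide_eq_true h]
    · have h1 : PySem.Str.isIn (PySem.Str.lower w) (PySem.Str.lower sentence) = false := by
        rcases Bool.eq_false_or_eq_true
            (PySem.Str.isIn (PySem.Str.lower w) (PySem.Str.lower sentence)) with hb | hb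
        · exact absurd ((PySem.Str.isIn_iff_infix _ _).mp hb) h
        · exact hb
      rw [h1, decide_eq_false h]
  simp only [Function.comp_def, hiff]
  by_cases h : pvAnimalWords.any
      (fun w => decide ((PySem.Str.lower w).toList <:+: (PySem.Str.lower sentence).toList)) = true
  · rw [if_pos h, if_pos h]
  · rw [if_neg h, if_neg h]
    by_cases h2 : pvComputerWords.any
        (fun w => decide ((PySem.Str.lower w).toList <:+: (PySem.Str.lower sentence).toList)) = true
    · rw [if_pos h2]
    · rw [if_neg h2]
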